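-- pv_equiv track=rewrite | github.com/radixark/miles | examples/RLVE/Gym/environments/distinct_array_permutation/environment.py | _is_valid_permutation
-- ===== SOURCE A (Python) =====
-- from typing import Optional, List
--
-- def _is_valid_permutation(arr_a: List[int], arr_b: List[int]) -> bool:
--     """
--     Check if arr_b is a valid permutation that satisfies the condition.
--     """
--     n = len(arr_a)
--
--     # Check if it's actually a permutation
--     if sorted(arr_a) != sorted(arr_b):
--         return False
--
--     # Check all non-empty proper subsets
--     for mask in range(1, (1 << n) - 1):  # From 1 to 2^n - 2
--         sum_a = 0
--         sum_b = 0
--         for i in range(n):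
--             if mask & (1 << i):
--                 sum_a += arr_a[i]
--                 sum_b += arr_b[i]
--
--         if sum_a == sum_b:
--             return False
--
--     return True
-- ===== SOURCE B (Python) =====
-- from typing import List
--
-- def _is_valid_permutation(arr_a: List[int], arr_b: List[int]) -> bool:
--     """
--     arr_b must be a permutation of arr_a with no non-empty proper subset
--     of indices having equal sums in both arrays, i.e. no non-empty proper
--     subset of the differences d_i = a_i - b_i sums to zero.  All subset
--     sums of d are built in one incremental doubling pass instead of
--     re-scanning the bits of every mask.
--     """
--     if sorted(arr_a) != sorted(arr_b):
--         return False
--     sums = [0]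
--     for a, b in zip(arr_a, arr_b):
--         d = a - b
--         sums = sums + [s + d for s in sums]
--     return 0 not in sums[1:-1]
-- ===== Notes on version B (the rewrite author's own statement) =====
-- stated objective: alternative
-- what changed: Instead of enumerating every mask in 1..2^n-2 and re-scanning all n bits per mask to accumulate the two subset sums, B takes the differences d_i = a_i - b_i and builds all 2^n subset sums of d in one incremental doubling pass (each element doubles the sum list), then checks that 0 does not occur among the proper non-empty subset sums (sums[1:-1]); the subset-enumeration work drops from O(n*2^n) to O(2^n), though a timing run's inputs are dominated by the sorted-equality check, so no measured speedup is claimed.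
import Mathlib
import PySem

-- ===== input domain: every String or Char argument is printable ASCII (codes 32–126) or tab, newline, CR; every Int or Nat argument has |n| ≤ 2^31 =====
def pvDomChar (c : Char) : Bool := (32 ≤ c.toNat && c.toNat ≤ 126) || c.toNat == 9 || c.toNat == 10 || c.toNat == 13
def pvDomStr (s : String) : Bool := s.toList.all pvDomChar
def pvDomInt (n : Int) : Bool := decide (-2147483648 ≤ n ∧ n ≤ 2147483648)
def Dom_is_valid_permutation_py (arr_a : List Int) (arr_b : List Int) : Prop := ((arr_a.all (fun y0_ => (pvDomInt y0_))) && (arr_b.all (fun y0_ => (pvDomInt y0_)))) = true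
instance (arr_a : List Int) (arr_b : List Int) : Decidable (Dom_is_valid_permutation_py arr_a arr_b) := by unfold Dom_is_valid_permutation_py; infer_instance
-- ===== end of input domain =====

-- B replaces A's per-mask inner bit loop by one incremental doubling pass that
-- builds all subset sums of the differences a_i - b_i (objective: alternative
-- algorithm, same return value).

-- ===== PORT A =====
-- literal port of _is_valid_permutation: sorted-equality check, then a loop over
-- masks 1 .. 2^n - 2 with an inner loop over bit positions.  '1 << i' is ported
-- as '(1 : Int) <<< i.toNat'; the loop only produces i with 0 ≤ i.
def is_valid_permutation_py (arr_a : List Int) (arr_b : List Int) : Bool :=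
  let n := arr_a.length
  if PySem.List.sorted arr_a (fun x => x) false ≠ PySem.List.sorted arr_b (fun x => x) false then
    false
  else
    (PySem.List.pyRange 1 ((1 <<< n : Int) - 1) 1).all (fun mask =>
      let p := (PySem.List.pyRange 0 (n : Int) 1).foldl
        (fun (p : Int × Int) i =>
          if PySem.Int.band mask ((1 : Int) <<< i.toNat) ≠ 0 then
            (p.1 + PySem.List.pyGetD arr_a i 0, p.2 + PySem.List.pyGetD arr_b i 0)
          else p) (0, 0)
      !(p.1 == p.2))

-- ===== PORT B =====
-- literal port of Source B: sorted-equality check, then the doubling pass over the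
-- zipped pairs, then '0 not in sums[1:-1]'.
def is_valid_permutation_py_alt (arr_a : List Int) (arr_b : List Int) : Bool :=
  if PySem.List.sorted arr_a (fun x => x) false ≠ PySem.List.sorted arr_b (fun x => x) false then
    false
  else
    let sums := (arr_a.zip arr_b).foldl
      (fun sums p => sums ++ sums.map (fun s => s + (p.1 - p.2))) [0]
    !((PySem.List.slice sums (some 1) (some (-1))).contains 0)

-- ===== PRECONDITION & SPEC =====
def Spec_is_valid_permutation_py (arr_a : List Int) (arr_b : List Int) (out : Bool) : Prop := out = is_valid_permutation_py_alt arr_a arr_b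
instance (arr_a : List Int) (arr_b : List Int) (out : Bool) : Decidable (Spec_is_valid_permutation_py arr_a arr_b out) := by unfold Spec_is_valid_permutation_py; infer_instance

-- ===== CLAIM (what is proved, stated in full; the proofs are below) =====
def Claim_equal_is_valid_permutation_py : Prop := ∀ (arr_a : List Int) (arr_b : List Int), Dom_is_valid_permutation_py arr_a arr_b → Spec_is_valid_permutation_py arr_a arr_b (is_valid_permutation_py arr_a arr_b)

-- ===== LEMMAS AND PROOFS =====

-- sum over the bit positions i < n that are set in k, of l[i] (0 past the end)
def pvMaskSumN (k n : Nat) (l : List Int) : Int :=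
  ((List.range n).map (fun i => if k.testBit i then l.getD i 0 else 0)).sum

theorem pvMaskSumN_succ (k n : Nat) (l : List Int) :
    pvMaskSumN k (n + 1) l = pvMaskSumN k n l + (if k.testBit n then l.getD n 0 else 0) := by
  simp [pvMaskSumN, List.range_succ]

theorem pv_shift_one (i : Nat) : ((1 : Int) <<< ((i : Int))) = ((1 <<< i : Nat) : Int) := by
  change ((Nat.shiftLeft' false 1 i : Nat) : Int) = _
  rw [Nat.shiftLeft'_false]

theorem pv_band_testBit (k i : Nat) :
    (PySem.Int.band (k : Int) ((1 : Int) <<< ((i : Int))) ≠ 0) ↔ k.testBit i := by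
  rw [pv_shift_one, PySem.Int.band_natCast, Nat.shiftLeft_eq, one_mul, Nat.and_two_pow]
  cases h : k.testBit i <;> simp

theorem pv_testBit_add_pow (k m : Nat) (h : k < 2 ^ m) :
    Nat.testBit (2 ^ m + k) m = true := by
  rw [Nat.testBit_eq_decide_div_mod_eq]
  have : (2 ^ m + k) / 2 ^ m = 1 := by
    rw [Nat.add_div_left k (Nat.two_pow_pos m), Nat.div_eq_of_lt h]
  simp [this]

-- A's inner loop over bit positions computes the two masked sums
theorem pv_foldA (arr_a arr_b : List Int) (k n : Nat) :
    (PySem.List.pyRange 0 (n : Int) 1).foldl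
      (fun (p : Int × Int) i =>
        if PySem.Int.band (k : Int) ((1 : Int) <<< i.toNat) ≠ 0 then
          (p.1 + PySem.List.pyGetD arr_a i 0, p.2 + PySem.List.pyGetD arr_b i 0)
        else p) (0, 0)
    = (pvMaskSumN k n arr_a, pvMaskSumN k n arr_b) := by
  have hr : PySem.List.pyRange 0 (n : Int) 1 = (List.range n).map (fun (j : Nat) => (j : Int)) := by
    rw [PySem.List.pyRange_one]
    simp only [Int.sub_zero, Int.toNat_natCast, zero_add]
  rw [hr, List.foldl_map]
  clear hr
  induction n with
  | zero => simp [pvMaskSumN]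
  | succ m ih =>
      rw [List.range_succ, List.foldl_append, ih, pvMaskSumN_succ, pvMaskSumN_succ]
      simp only [List.foldl_cons, List.foldl_nil, Int.toNat_natCast, PySem.List.pyGetD_natCast]
      by_cases h : k.testBit m
      · rw [if_pos ((pv_band_testBit k m).mpr h), if_pos h, if_pos h]
      · rw [if_neg (fun hc => h ((pv_band_testBit k m).mp hc)), if_neg h, if_neg h]
        simp

-- masked sums only read entries below n: an appended element is invisible
theorem pvMaskSumN_append (k n : Nat) (l : List Int) (x : Int) (h : n ≤ l.length) :
    pvMaskSumN k n (l ++ [x]) = pvMaskSumN k n l := by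
  unfold pvMaskSumN
  congr 1
  apply List.map_congr_left
  intro i hi
  have hi' : i < l.length := lt_of_lt_of_le (List.mem_range.mp hi) h
  rw [List.getD_eq_getElem?_getD, List.getD_eq_getElem?_getD, List.getElem?_append_left hi']

theorem pvMaskSumN_congr (k k' n : Nat) (l : List Int)
    (h : ∀ i, i < n → k.testBit i = k'.testBit i) :
    pvMaskSumN k n l = pvMaskSumN k' n l := by
  unfold pvMaskSumN
  congr 1
  apply List.map_congr_left
  intro i hi
  rw [h i (List.mem_range.mp hi)]

-- B's doubling pass builds the masked sums of all masks 0 .. 2^len - 1 in order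
theorem pv_foldB (l : List Int) :
    l.foldl (fun sums x => sums ++ sums.map (fun s => s + x)) [0]
    = (List.range (2 ^ l.length)).map (fun k => pvMaskSumN k l.length l) := by
  induction l using List.reverseRecOn with
  | nil => simp [pvMaskSumN]
  | append_singleton l x ih =>
      rw [List.foldl_append, ih]
      simp only [List.foldl_cons, List.foldl_nil]
      have hlen : (l ++ [x]).length = l.length + 1 := by simp
      rw [hlen, pow_succ, Nat.mul_two, List.range_add, List.map_append]
      congr 1
      · -- low half: bit l.length is unset
        symm
        apply List.map_congr_left
        intro k hk
        have hk' : k < 2 ^ l.length := List.mem_range.mp hk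
        rw [pvMaskSumN_succ, pvMaskSumN_append k l.length l x le_rfl,
            Nat.testBit_lt_two_pow hk']
        simp
      · -- high half: the new element is added to every subset of the low half
        rw [List.map_map, List.map_map]
        symm
        apply List.map_congr_left
        intro k hk
        have hk' : k < 2 ^ l.length := List.mem_range.mp hk
        simp only [Function.comp_apply]
        rw [pvMaskSumN_succ, pvMaskSumN_append _ l.length l x le_rfl,
            pvMaskSumN_congr (2 ^ l.length + k) k l.length l
              (fun i hi => Nat.testBit_two_pow_add_gt hi k),
            pv_testBit_add_pow k l.length hk']
        simp [List.getD_eq_getElem?_getD]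

-- masked sum of the differences = difference of the masked sums
theorem pv_diffsum (arr_a arr_b : List Int) (k n : Nat)
    (ha : n ≤ arr_a.length) (hb : n ≤ arr_b.length) :
    pvMaskSumN k n ((arr_a.zip arr_b).map (fun p => p.1 - p.2))
      = pvMaskSumN k n arr_a - pvMaskSumN k n arr_b := by
  induction n with
  | zero => simp [pvMaskSumN]
  | succ m ih =>
      have hm : m ≤ arr_a.length := by omega
      have hm' : m ≤ arr_b.length := by omega
      rw [pvMaskSumN_succ, pvMaskSumN_succ, pvMaskSumN_succ, ih hm hm']
      have hz : m < ((arr_a.zip arr_b).map (fun p : Int × Int => p.1 - p.2)).length := by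
        simp [List.length_zip]; omega
      have hget : ((arr_a.zip arr_b).map (fun p : Int × Int => p.1 - p.2)).getD m 0
          = arr_a.getD m 0 - arr_b.getD m 0 := by
        rw [List.getD_eq_getElem _ _ hz, List.getD_eq_getElem _ _ (by omega),
            List.getD_eq_getElem _ _ (by omega)]
        simp [List.getElem_zip]
      rw [hget]
      by_cases h : k.testBit m
      · simp [h]; ring
      · simp [h]

theorem pv_tail_dropLast_range (N : Nat) :
    (List.range N).tail.dropLast = List.range' 1 (N - 2) := by
  rcases N with _ | _ | n
  · simp
  · simp
  · rw [List.range_eq_range']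
    have h1 : List.range' 0 (n + 2) = 0 :: List.range' 1 (n + 1) := by
      rw [List.range'_succ]
    rw [h1]
    simp only [List.tail_cons]
    have h2 : List.range' 1 (n + 1) = List.range' 1 n ++ [1 + n] := by
      rw [List.range'_1_concat]
    rw [h2, List.dropLast_concat]
    simp

-- Python's xs[1:-1]
theorem pv_slice_1_neg1 (xs : List Int) :
    PySem.List.slice xs (some 1) (some (-1)) = xs.tail.dropLast := by
  simp only [PySem.List.slice, PySem.List.clampIdx_neg_one]
  have h1 : PySem.List.clampIdx xs.length 1 = min 1 xs.length := by
    simp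
  rw [h1, List.dropLast_eq_take, ← List.drop_one]
  rcases xs with _ | ⟨y, ys⟩
  · simp
  · simp only [List.length_cons, List.drop_one, List.tail_cons]
    congr 1

-- ===== VERDICT (by name: the statement is the Claim_ definition above) =====
theorem is_valid_permutation_py_spec : Claim_equal_is_valid_permutation_py := by
  unfold Claim_equal_is_valid_permutation_py
  intro arr_a arr_b _
  unfold Spec_is_valid_permutation_py
  unfold is_valid_permutation_py is_valid_permutation_py_alt
  by_cases hs : PySem.List.sorted arr_a (fun x => x) false
      = PySem.List.sorted arr_b (fun x => x) false
  · have hperm : arr_a.Perm arr_b := (PySem.List.sorted_id_eq_sorted_id_iff_perm arr_a arr_b).mp hs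
    have hlen : arr_b.length = arr_a.length := hperm.length_eq.symm
    simp only [hs, ne_eq, not_true_eq_false, if_false]
    set n := arr_a.length with hn
    set d := (arr_a.zip arr_b).map (fun p : Int × Int => p.1 - p.2) with hdd
    have hd : d.length = n := by simp [hdd, List.length_zip, hlen]; exact le_rfl
    have hB : (List.foldl (fun sums p => sums ++ List.map (fun s => s + (p.1 - p.2)) sums) [0] (arr_a.zip arr_b))
        = (List.range (2 ^ n)).map (fun k => pvMaskSumN k n d) := by
      have h1 : (List.foldl (fun sums p => sums ++ List.map (fun s => s + (p.1 - p.2)) sums) [0] (arr_a.zip arr_b))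
          = d.foldl (fun sums x => sums ++ sums.map (fun s => s + x)) [0] :=
        (List.foldl_map (f := fun p : Int × Int => p.1 - p.2)
          (g := fun sums x => sums ++ List.map (fun s => s + x) sums)
          (l := arr_a.zip arr_b) (init := [0])).symm
      refine h1.trans ?_
      rw [pv_foldB, hd]
    rw [hB, pv_slice_1_neg1, ← List.map_tail, ← List.map_dropLast, pv_tail_dropLast_range]
    rw [Bool.eq_iff_iff, List.all_eq_true]
    have hsh : ((1 <<< n : Nat) : Int) = ((2 ^ n : Nat) : Int) := by
      rw [Nat.shiftLeft_eq, one_mul]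
    rw [hsh]
    have hN : 1 ≤ 2 ^ n := Nat.one_le_two_pow
    have ha : n ≤ arr_a.length := le_rfl
    have hb : n ≤ arr_b.length := le_of_eq hlen.symm
    constructor
    · intro hall
      rw [Bool.not_eq_true', List.contains_eq_mem, decide_eq_false_iff_not]
      intro h0
      obtain ⟨k, hk, hF⟩ := List.mem_map.mp h0
      obtain ⟨hk1, hk2⟩ := List.mem_range'_1.mp hk
      have hk2' : k + 1 < 2 ^ n := by omega
      have hmem : ((k : Int)) ∈ PySem.List.pyRange 1 (((2 ^ n : Nat) : Int) - 1) 1 := by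
        rw [PySem.List.mem_pyRange_one]
        constructor
        · exact_mod_cast hk1
        · omega
      have hp := hall _ hmem
      rw [pv_foldA arr_a arr_b k n] at hp
      rw [Bool.not_eq_true', beq_eq_false_iff_ne] at hp
      apply hp
      show pvMaskSumN k n arr_a = pvMaskSumN k n arr_b
      have h0' : pvMaskSumN k n d = 0 := hF
      have hsub := pv_diffsum arr_a arr_b k n ha hb
      rw [← hdd] at hsub
      omega
    · intro hnc mask hmask
      rw [Bool.not_eq_true', List.contains_eq_mem, decide_eq_false_iff_not] at hnc
      obtain ⟨hm1, hm2⟩ := PySem.List.mem_pyRange_one.mp hmask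
      lift mask to Nat using (by omega : (0 : Int) ≤ mask) with k
      rw [pv_foldA arr_a arr_b k n, Bool.not_eq_true', beq_eq_false_iff_ne]
      intro heq
      have heq' : pvMaskSumN k n arr_a = pvMaskSumN k n arr_b := heq
      apply hnc
      apply List.mem_map.mpr
      refine ⟨k, ?_, ?_⟩
      · rw [List.mem_range'_1]
        constructor
        · exact_mod_cast hm1
        · have : (k : Int) < ((2 ^ n : Nat) : Int) - 1 := hm2
          push_cast at this
          omega
      · show pvMaskSumN k n d = 0
        have hsub := pv_diffsum arr_a arr_b k n ha hb
        rw [← hdd] at hsub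
        omega
  · simp [hs]
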